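-- pv_equiv track=rewrite | github.com/maria-pitulice/licenta | algorithms.py | calculateLine
-- ===== SOURCE A (Python) =====
-- import bisect
--
-- def calculateLine(fingerIndex,tokensPerLine,K):
--     linesVector=[]
--     lista=[]
--     for i in fingerIndex:
--         start=bisect.bisect_right(tokensPerLine,i[0])
--         end=bisect.bisect_right(tokensPerLine,i[0]+K)
--         trueInv=[x for x in list(range(start,end+1)) if x not in lista]
--         lista.extend(trueInv)
--         interval=[[x,i[1]] for x in trueInv]
--         linesVector.extend(interval)
--     return linesVector
-- ===== SOURCE B (Python) =====
-- import bisect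
--
-- def calculateLine(fingerIndex, tokensPerLine, K):
--     # Pass 1: generate all candidate (line, label) pairs, without dedup.
--     flat = []
--     for i in fingerIndex:
--         start = bisect.bisect_right(tokensPerLine, i[0])
--         end = bisect.bisect_right(tokensPerLine, i[0] + K)
--         label = i[1]
--         for x in range(start, end + 1):
--             flat.append((x, label))
--     # Pass 2: keep the first occurrence of each line index.
--     result = []
--     seen = set()
--     for x, label in flat:
--         if x not in seen:
--             seen.add(x)
--             result.append([x, label])
--     return result
-- ===== Notes on version B (the rewrite author's own statement) =====
-- stated objective: alternative
-- what changed: B splits A's single interleaved loop (filter each interval's range against the growing dedup list, then extend) into two differently-shaped passes: one flat candidate-generation pass over the intervals, then one linear dedup pass with a seen-set keeping first occurrences; Pre_ excludes intervals shorter than 2 entries, where A raises IndexError except when it accidentally skips reading i[1] because the interval contributes nothing new.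
-- outside the precondition, e.g. on calculateLine([[0, 1], [0]], [5], 0): A returns [[0, 1]], B raises IndexError; on calculateLine([[1]], [0, 2], 1): A raises IndexError, B raises IndexError
import Mathlib
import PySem

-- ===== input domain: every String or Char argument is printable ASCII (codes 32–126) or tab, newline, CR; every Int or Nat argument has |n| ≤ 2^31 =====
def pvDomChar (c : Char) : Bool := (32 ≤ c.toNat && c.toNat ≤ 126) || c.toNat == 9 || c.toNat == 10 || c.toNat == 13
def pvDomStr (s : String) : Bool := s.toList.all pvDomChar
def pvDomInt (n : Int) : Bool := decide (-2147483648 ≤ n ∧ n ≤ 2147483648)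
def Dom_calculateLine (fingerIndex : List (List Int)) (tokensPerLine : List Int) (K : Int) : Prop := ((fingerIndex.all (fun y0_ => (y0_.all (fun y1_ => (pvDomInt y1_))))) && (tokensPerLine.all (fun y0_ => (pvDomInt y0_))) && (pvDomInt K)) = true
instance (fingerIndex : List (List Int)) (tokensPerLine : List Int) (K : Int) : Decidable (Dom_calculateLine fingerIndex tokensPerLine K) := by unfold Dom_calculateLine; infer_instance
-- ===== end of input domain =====

-- B separates candidate generation (one flat pass over the intervals) from deduplication
-- (one pass with a seen-set), instead of A's filter-against-the-growing-list inside each interval;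
-- objective: alternative decomposition, same output.

-- ===== PORT A =====
def calculateLine (fingerIndex : List (List Int)) (tokensPerLine : List Int) (K : Int) : List (List Int) :=
  (fingerIndex.foldl (fun (st : List (List Int) × List Int) i =>
    let start : Int := (PySem.List.bisectRight tokensPerLine (PySem.List.pyGetD i 0 0) : Nat)
    let stop : Int := (PySem.List.bisectRight tokensPerLine (PySem.List.pyGetD i 0 0 + K) : Nat)
    let trueInv := (PySem.List.pyRange start (stop + 1) 1).filter (fun x => !st.2.contains x)
    (st.1 ++ trueInv.map (fun x => [x, PySem.List.pyGetD i 1 0]), st.2 ++ trueInv))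
    ([], [])).1

-- ===== PORT B =====
-- pass 2 of Source B: first occurrence of each line index wins
def pvDedupPass : List (Int × Int) → PySem.Set Int → List (List Int) → List (List Int)
  | [], _, res => res
  | (x, l) :: rest, seen, res =>
    if seen.contains x then pvDedupPass rest seen res
    else pvDedupPass rest (seen.add x) (res ++ [[x, l]])

def calculateLine_alt (fingerIndex : List (List Int)) (tokensPerLine : List Int) (K : Int) : List (List Int) :=
  let flat := fingerIndex.foldl (fun (acc : List (Int × Int)) i =>
    let start : Int := (PySem.List.bisectRight tokensPerLine (PySem.List.pyGetD i 0 0) : Nat)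
    let stop : Int := (PySem.List.bisectRight tokensPerLine (PySem.List.pyGetD i 0 0 + K) : Nat)
    acc ++ (PySem.List.pyRange start (stop + 1) 1).map (fun x => (x, PySem.List.pyGetD i 1 0))) []
  pvDedupPass flat PySem.Set.empty []

-- ===== PRECONDITION & SPEC =====
-- Pre_ excludes inputs with an interval of fewer than two entries: A usually raises IndexError
-- on i[1] there, and where it still returns it is only because lazy evaluation skipped reading
-- i[1] for an interval contributing no new line — an artefact of A's implementation; B raises.
def Pre_calculateLine (fingerIndex : List (List Int)) (tokensPerLine : List Int) (K : Int) : Prop :=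
  ∀ i ∈ fingerIndex, 2 ≤ i.length
instance (fingerIndex : List (List Int)) (tokensPerLine : List Int) (K : Int) : Decidable (Pre_calculateLine fingerIndex tokensPerLine K) := by unfold Pre_calculateLine; infer_instance

def pvWitness_calculateLine : List (List Int) × List Int × Int := ([[0, 1], [2, 3]], [1, 2, 3], 2)

def Spec_calculateLine (fingerIndex : List (List Int)) (tokensPerLine : List Int) (K : Int) (out : List (List Int)) : Prop := out = calculateLine_alt fingerIndex tokensPerLine K
instance (fingerIndex : List (List Int)) (tokensPerLine : List Int) (K : Int) (out : List (List Int)) : Decidable (Spec_calculateLine fingerIndex tokensPerLine K out) := by unfold Spec_calculateLine; infer_instance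

-- ===== CLAIM (what is proved, stated in full; the proofs are below) =====
def Claim_equal_calculateLine : Prop := ∀ (fingerIndex : List (List Int)) (tokensPerLine : List Int) (K : Int), Dom_calculateLine fingerIndex tokensPerLine K → Pre_calculateLine fingerIndex tokensPerLine K → Spec_calculateLine fingerIndex tokensPerLine K (calculateLine fingerIndex tokensPerLine K)

-- ===== LEMMAS AND PROOFS =====

-- candidate line indices of one interval
def pvCand (tokensPerLine : List Int) (K : Int) (i : List Int) : List Int :=
  PySem.List.pyRange ((PySem.List.bisectRight tokensPerLine (PySem.List.pyGetD i 0 0) : Nat) : Int)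
    (((PySem.List.bisectRight tokensPerLine (PySem.List.pyGetD i 0 0 + K) : Nat) : Int) + 1) 1

lemma pvDedupPass_interval (c : List Int) (hnd : c.Nodup) :
    ∀ (seen : PySem.Set Int) (res : List (List Int)) (l : Int) (rest : List (Int × Int)),
    pvDedupPass (c.map (fun x => (x, l)) ++ rest) seen res
      = pvDedupPass rest (seen ++ c.filter (fun x => !seen.contains x))
          (res ++ (c.filter (fun x => !seen.contains x)).map (fun x => [x, l])) := by
  induction c with
  | nil => intro seen res l rest; simp
  | cons x c ih =>
    intro seen res l rest
    have hx : x ∉ c := (List.nodup_cons.mp hnd).1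
    have hc : c.Nodup := (List.nodup_cons.mp hnd).2
    by_cases hm : x ∈ seen
    · simp only [List.map_cons, List.cons_append, pvDedupPass]
      rw [if_pos (by simpa using hm), ih hc]
      simp [hm]
    · simp only [List.map_cons, List.cons_append, pvDedupPass]
      rw [if_neg (by simpa using hm), ih hc]
      have hadd : seen.add x = seen ++ [x] := by
        simp [PySem.Set.add, hm]
      rw [hadd]
      have hfilt : c.filter (fun y => !(seen ++ [x]).contains y)
          = c.filter (fun y => !seen.contains y) := by
        apply List.filter_congr
        intro y hy
        have hne : y ≠ x := fun e => hx (e ▸ hy)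
        simp [hne]
      rw [hfilt]
      simp [hm, List.append_assoc]

lemma pvMain (tokensPerLine : List Int) (K : Int) :
    ∀ (fi : List (List Int)) (seen : List Int) (res : List (List Int)),
    pvDedupPass (fi.flatMap (fun i => (pvCand tokensPerLine K i).map (fun x => (x, PySem.List.pyGetD i 1 0)))) seen res
      = (fi.foldl (fun (st : List (List Int) × List Int) i =>
          let trueInv := (pvCand tokensPerLine K i).filter (fun x => !st.2.contains x)
          (st.1 ++ trueInv.map (fun x => [x, PySem.List.pyGetD i 1 0]), st.2 ++ trueInv))
          (res, seen)).1 := by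
  intro fi
  induction fi with
  | nil => intro seen res; simp [pvDedupPass]
  | cons i fi ih =>
    intro seen res
    rw [List.flatMap_cons,
      pvDedupPass_interval (pvCand tokensPerLine K i)
        (by unfold pvCand; exact PySem.List.nodup_pyRange_one _ _) seen res _ _, ih]
    rfl

lemma pvFlat_eq (tokensPerLine : List Int) (K : Int) (fi : List (List Int)) :
    (fi.foldl (fun (acc : List (Int × Int)) i =>
      acc ++ (pvCand tokensPerLine K i).map (fun x => (x, PySem.List.pyGetD i 1 0))) [])
    = fi.flatMap (fun i => (pvCand tokensPerLine K i).map (fun x => (x, PySem.List.pyGetD i 1 0))) := by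
  rw [PySem.List.foldl_append_eq_flatMap]
  simp

-- ===== VERDICT (by name: the statement is the Claim_ definition above) =====
theorem calculateLine_spec : Claim_equal_calculateLine := by
  intro fi tpl K _ _
  show calculateLine fi tpl K = calculateLine_alt fi tpl K
  have h1 : calculateLine fi tpl K = (fi.foldl (fun (st : List (List Int) × List Int) i =>
      let trueInv := (pvCand tpl K i).filter (fun x => !st.2.contains x)
      (st.1 ++ trueInv.map (fun x => [x, PySem.List.pyGetD i 1 0]), st.2 ++ trueInv)) ([], [])).1 := rfl
  have h2 : calculateLine_alt fi tpl K = pvDedupPass (fi.foldl (fun (acc : List (Int × Int)) i =>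
      acc ++ (pvCand tpl K i).map (fun x => (x, PySem.List.pyGetD i 1 0))) []) [] [] := rfl
  rw [h1, h2, pvFlat_eq, pvMain]
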